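-- pv_equiv track=rewrite | github.com/nickdebrief/civic-decision-engine | timeline.py | detect_moment_of_change
-- ===== SOURCE A (Python) =====
-- from typing import Any
--
-- def detect_moment_of_change(
--     transitions: list[dict[str, Any]]
-- ) -> dict[str, Any] | None:
--     meaningful = [t for t in transitions if t["direction"] != "structural_update"]
--
--     for i, t in enumerate(meaningful):
--         if t["direction"] == "deteriorating":
--             if i == 0 or meaningful[i - 1]["direction"] != "deteriorating":
--                 return t
--     return None
-- ===== SOURCE B (Python) =====
-- def detect_moment_of_change(transitions):
--     return next((t for t in transitions if t["direction"] == "deteriorating"), None)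
-- ===== Notes on version B (the rewrite author's own statement) =====
-- stated objective: simpler
-- what changed: B drops the intermediate structural_update-filtered list and the predecessor-index check (the first deteriorating element always passes both) and does a single scan returning the first transition whose direction is 'deteriorating'.
import Mathlib
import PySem

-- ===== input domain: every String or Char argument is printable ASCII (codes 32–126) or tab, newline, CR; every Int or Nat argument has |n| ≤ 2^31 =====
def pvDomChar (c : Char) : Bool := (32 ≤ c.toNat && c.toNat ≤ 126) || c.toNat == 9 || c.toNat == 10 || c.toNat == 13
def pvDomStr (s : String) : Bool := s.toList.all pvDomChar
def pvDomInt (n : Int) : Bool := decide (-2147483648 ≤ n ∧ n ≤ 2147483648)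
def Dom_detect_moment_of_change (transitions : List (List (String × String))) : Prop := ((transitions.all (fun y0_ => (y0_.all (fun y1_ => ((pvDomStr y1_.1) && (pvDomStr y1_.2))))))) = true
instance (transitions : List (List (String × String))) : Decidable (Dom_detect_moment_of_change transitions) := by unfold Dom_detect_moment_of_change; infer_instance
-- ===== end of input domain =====

-- B drops A's intermediate filtered list and predecessor-index check and returns the first
-- transition whose direction is "deteriorating" in a single scan (objective: simpler).

-- t["direction"] as an association-list dict lookup (first match; none = KeyError, outside Pre_)
def pvDir? (t : List (String × String)) : Option String :=
  (PySem.Dict.mk t).get? "direction"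

-- ===== PORT A =====
-- the 'for i, t in enumerate(meaningful)' loop, carrying 'meaningful' for the meaningful[i-1] lookup
def pvALoop (meaningful : List (List (String × String))) :
    List (Int × List (String × String)) → Option (List (String × String))
  | [] => none
  | (i, t) :: rest =>
    if pvDir? t == some "deteriorating" then
      if i == 0 || !(((PySem.List.pyGet? meaningful (i - 1)).bind (fun p => pvDir? p)) == some "deteriorating") then
        some t
      else pvALoop meaningful rest
    else pvALoop meaningful rest

def detect_moment_of_change (transitions : List (List (String × String))) : Option (List (String × String)) :=
  let meaningful := transitions.filter (fun t => !(pvDir? t == some "structural_update"))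
  pvALoop meaningful (PySem.List.enumerate meaningful)

-- ===== PORT B =====
def detect_moment_of_change_alt (transitions : List (List (String × String))) : Option (List (String × String)) :=
  transitions.find? (fun t => pvDir? t == some "deteriorating")

-- ===== PRECONDITION & SPEC =====
-- Python A raises KeyError whenever some transition lacks a "direction" key; Pre_ is exactly the
-- inputs on which A returns normally.
def Pre_detect_moment_of_change (transitions : List (List (String × String))) : Prop :=
  ∀ t ∈ transitions, (pvDir? t).isSome = true
instance (transitions : List (List (String × String))) : Decidable (Pre_detect_moment_of_change transitions) := by unfold Pre_detect_moment_of_change; infer_instance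

def pvWitness_detect_moment_of_change : (List (List (String × String))) :=
  [[("direction", "improving")], [("direction", "deteriorating")], [("direction", "structural_update")]]

def Spec_detect_moment_of_change (transitions : List (List (String × String))) (out : Option (List (String × String))) : Prop := out = detect_moment_of_change_alt transitions
instance (transitions : List (List (String × String))) (out : Option (List (String × String))) : Decidable (Spec_detect_moment_of_change transitions out) := by unfold Spec_detect_moment_of_change; infer_instance

-- ===== CLAIM (what is proved, stated in full; the proofs are below) =====
def Claim_equal_detect_moment_of_change : Prop := ∀ (transitions : List (List (String × String))), Dom_detect_moment_of_change transitions → Pre_detect_moment_of_change transitions → Spec_detect_moment_of_change transitions (detect_moment_of_change transitions)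

-- ===== LEMMAS AND PROOFS =====

-- A's loop over a suffix of 'meaningful' finds the first deteriorating element of that suffix,
-- provided the element just before the suffix (if any) is not deteriorating.
theorem pvALoop_eq_find? (suf pre : List (List (String × String)))
    (h : pre = [] ∨ ∃ t, pre.getLast? = some t ∧ ¬ (pvDir? t == some "deteriorating") = true) :
    pvALoop (pre ++ suf) (PySem.List.enumerate suf pre.length) =
      suf.find? (fun t => pvDir? t == some "deteriorating") := by
  induction suf generalizing pre with
  | nil => simp [pvALoop, PySem.List.enumerate_nil]
  | cons t rest ih =>
    rw [PySem.List.enumerate_cons]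
    by_cases hp : (pvDir? t == some "deteriorating") = true
    · have hguard : (((pre.length : Int)) == 0 ||
          !(((PySem.List.pyGet? (pre ++ t :: rest) ((pre.length : Int) - 1)).bind (fun p => pvDir? p)) == some "deteriorating")) = true := by
        rcases h with h0 | ⟨u, hu, hnu⟩
        · subst h0; simp
        · rcases List.getLast?_eq_some_iff.mp hu with ⟨pre', rfl⟩
          have hlen : ((pre' ++ [u]).length : Int) - 1 = (pre'.length : Int) := by
            simp
          rw [hlen, List.append_assoc]
          have hg : PySem.List.pyGet? (pre' ++ ([u] ++ t :: rest)) (pre'.length : Int) = some u := by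
            simpa using PySem.List.pyGet?_append_length pre' (u :: t :: rest)
          rw [hg]
          simp only [Option.bind_some, Bool.or_eq_true, Bool.not_eq_eq_eq_not]
          right
          simpa using hnu
      simp [pvALoop, hp, hguard, List.find?_cons]
    · have step := ih (pre ++ [t]) (Or.inr ⟨t, by simp, hp⟩)
      have hlen : (((pre ++ [t]).length : Int)) = (pre.length : Int) + 1 := by simp
      rw [hlen, List.append_assoc] at step
      simp only [List.singleton_append] at step
      simp [pvALoop, hp, List.find?_cons, step]

theorem find?_filter_drop (l : List (List (String × String))) :
    (l.filter (fun t => !(pvDir? t == some "structural_update"))).find?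
        (fun t => pvDir? t == some "deteriorating") =
      l.find? (fun t => pvDir? t == some "deteriorating") := by
  induction l with
  | nil => rfl
  | cons t rest ih =>
    by_cases hp : (pvDir? t == some "deteriorating") = true
    · have h1 : pvDir? t = some "deteriorating" := by simpa using hp
      have hq : (!(pvDir? t == some "structural_update")) = true := by simp [h1]
      simp [List.filter_cons, hq, List.find?_cons, hp]
    · by_cases hq : (pvDir? t == some "structural_update") = true
      · simp [List.filter_cons, hq, List.find?_cons, hp, ih]
      · simp [List.filter_cons, hq, List.find?_cons, hp, ih]

-- ===== VERDICT (by name: the statement is the Claim_ definition above) =====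
theorem detect_moment_of_change_spec : Claim_equal_detect_moment_of_change := by
  intro transitions _ _
  unfold Spec_detect_moment_of_change detect_moment_of_change detect_moment_of_change_alt
  have h := pvALoop_eq_find?
    (transitions.filter (fun t => !(pvDir? t == some "structural_update"))) [] (Or.inl rfl)
  simp only [List.nil_append, List.length_nil, Nat.cast_zero] at h
  rw [h, find?_filter_drop]
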